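-- pv_equiv track=rewrite | github.com/MeridianResearch/cot_health_metrics | src/finetune/ft_for_internalized.py | _render_filler_format
-- ===== SOURCE A (Python) =====
-- from typing import List, Dict, Optional, Tuple
--
-- def _render_filler_format(messages: List[Dict[str, str]]) -> Tuple[str, str]:
--     """Handle filler-type datasets with fixed token patterns"""
--     # Extract user question and assistant response
--     user_msg = next((msg for msg in messages if msg["role"] == "user"), None)
--     assistant_msg = next((msg for msg in messages if msg["role"] == "assistant"), None)
--
--     if not user_msg or not assistant_msg:
--         raise ValueError("Invalid message format for filler dataset")
--
--     prompt = user_msg["content"]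
--     target = assistant_msg["content"]
--
--     return prompt, target
-- ===== SOURCE B (Python) =====
-- from typing import List, Dict, Tuple
--
-- def _render_filler_format(messages: List[Dict[str, str]]) -> Tuple[str, str]:
--     """Handle filler-type datasets with fixed token patterns"""
--     user_msg = None
--     assistant_msg = None
--     for msg in messages:
--         role = msg["role"]
--         if user_msg is None and role == "user":
--             user_msg = msg
--         if assistant_msg is None and role == "assistant":
--             assistant_msg = msg
--         if user_msg is not None and assistant_msg is not None:
--             break
--     if user_msg is None or assistant_msg is None:
--         raise ValueError("Invalid message format for filler dataset")
--     return user_msg["content"], assistant_msg["content"]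
-- ===== Notes on version B (the rewrite author's own statement) =====
-- stated objective: alternative
-- what changed: Replaces A's two independent first-match scans (one per role) with a single forward loop that fills two Optional slots and breaks once both are found.
import Mathlib
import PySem

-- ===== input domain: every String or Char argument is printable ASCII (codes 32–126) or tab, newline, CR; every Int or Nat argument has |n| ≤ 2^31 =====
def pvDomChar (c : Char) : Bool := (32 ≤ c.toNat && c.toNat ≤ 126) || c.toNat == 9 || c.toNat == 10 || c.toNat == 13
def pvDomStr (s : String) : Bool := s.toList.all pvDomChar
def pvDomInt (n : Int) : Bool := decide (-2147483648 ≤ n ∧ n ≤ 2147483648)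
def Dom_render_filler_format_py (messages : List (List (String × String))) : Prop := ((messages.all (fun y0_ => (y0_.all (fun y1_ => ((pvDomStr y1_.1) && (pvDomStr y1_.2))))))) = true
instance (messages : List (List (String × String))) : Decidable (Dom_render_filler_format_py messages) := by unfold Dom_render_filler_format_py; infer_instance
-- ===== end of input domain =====

-- B makes one combined forward pass with two Optional slots instead of A's two independent
-- first-match scans; same return value wherever A returns (objective: alternative decomposition).

-- ===== PORT A =====
-- next((msg for msg in messages if msg["role"] == role), None): first-match scan.
-- msg["role"] raises KeyError when absent; those inputs are outside Pre_ below.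
def pyNextRole (role : String) : List (List (String × String)) → Option (List (String × String))
  | [] => none
  | m :: rest => if m.lookup "role" == some role then some m else pyNextRole role rest

def render_filler_format_py (messages : List (List (String × String))) : String × String :=
  let user_msg := pyNextRole "user" messages
  let assistant_msg := pyNextRole "assistant" messages
  match user_msg, assistant_msg with
  | some u, some a => ((u.lookup "content").getD "", (a.lookup "content").getD "")
  | _, _ => ("", "")   -- Python raises ValueError here; outside Pre_

-- ===== PORT B =====
-- single loop filling two Optional slots, breaking once both are set
def bLoop (user_msg assistant_msg : Option (List (String × String))) :
    List (List (String × String)) → Option (List (String × String)) × Option (List (String × String))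
  | msg :: rest =>
    let role := msg.lookup "role"
    let user' := if user_msg.isNone && role == some "user" then some msg else user_msg
    let assistant' := if assistant_msg.isNone && role == some "assistant" then some msg else assistant_msg
    if user'.isSome && assistant'.isSome then (user', assistant')
    else bLoop user' assistant' rest
  | [] => (user_msg, assistant_msg)

def render_filler_format_py_alt (messages : List (List (String × String))) : String × String :=
  let r := bLoop none none messages
  -- if user_msg is None or assistant_msg is None: Python raises ValueError (outside Pre_)
  (r.1.bind (fun u => r.2.map (fun a =>
    ((u.lookup "content").getD "", (a.lookup "content").getD "")))).getD ("", "")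

-- ===== PRECONDITION & SPEC =====
-- Exactly the inputs on which A returns: within the leading prefix of messages that all carry a
-- "role" key there is a user message and an assistant message, and the first of each has "content".
def Pre_render_filler_format_py (messages : List (List (String × String))) : Prop :=
  let p := messages.takeWhile (fun m => (m.lookup "role").isSome)
  (((p.find? (fun m => m.lookup "role" == some "user")).bind (fun u =>
     (p.find? (fun m => m.lookup "role" == some "assistant")).map (fun a =>
       (u.lookup "content").isSome && (a.lookup "content").isSome))).getD false) = true
instance (messages : List (List (String × String))) : Decidable (Pre_render_filler_format_py messages) := by unfold Pre_render_filler_format_py; infer_instance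

def pvWitness_render_filler_format_py : (List (List (String × String))) :=
  [[("role", "user"), ("content", "q")], [("role", "assistant"), ("content", "a")]]

def Spec_render_filler_format_py (messages : List (List (String × String))) (out : String × String) : Prop := out = render_filler_format_py_alt messages
instance (messages : List (List (String × String))) (out : String × String) : Decidable (Spec_render_filler_format_py messages out) := by unfold Spec_render_filler_format_py; infer_instance

-- ===== CLAIM (what is proved, stated in full; the proofs are below) =====
def Claim_equal_render_filler_format_py : Prop := ∀ (messages : List (List (String × String))), Dom_render_filler_format_py messages → Pre_render_filler_format_py messages → Spec_render_filler_format_py messages (render_filler_format_py messages)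

-- ===== LEMMAS AND PROOFS =====

-- B's loop computes, for each slot still empty, the same first match as A's scan.
theorem bLoop_eq (msgs : List (List (String × String)))
    (u a : Option (List (String × String))) :
    bLoop u a msgs =
      ((match u with | some x => some x | none => pyNextRole "user" msgs),
       (match a with | some x => some x | none => pyNextRole "assistant" msgs)) := by
  induction msgs generalizing u a with
  | nil => cases u <;> cases a <;> rfl
  | cons m rest ih =>
    simp only [bLoop, pyNextRole]
    cases u <;> cases a <;>
      simp only [Option.isNone, Option.isSome, Bool.true_and, Bool.false_and, if_false] <;>
      by_cases hu : (m.lookup "role" == some "user") = true <;>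
      by_cases ha : (m.lookup "role" == some "assistant") = true <;>
      simp [hu, ha, ih]

-- ===== VERDICT (by name: the statement is the Claim_ definition above) =====
theorem render_filler_format_py_spec : Claim_equal_render_filler_format_py := by
  intro messages _ _
  unfold Spec_render_filler_format_py render_filler_format_py render_filler_format_py_alt
  rw [bLoop_eq]
  cases pyNextRole "user" messages <;> cases pyNextRole "assistant" messages <;> rfl
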